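-- pv_equiv track=rewrite | github.com/haptork/csaransh | csaransh_pp/pysrc/lineClassify.py | classesDataToSave
-- ===== SOURCE A (Python) =====
-- def classesDataToSave(cluster_labels, show_dim, tag):
--     class_points = {}
--     class_tags = {}
--     for i, label in enumerate(cluster_labels):
--         label = str(label)
--         if not label in class_points:
--             class_points[label] = [[], [], []]
--             class_tags[label] = []
--         class_points[label][0].append(show_dim[i][0])
--         class_points[label][1].append(show_dim[i][1])
--         class_points[label][2].append(0)
--         class_tags[label].append(tag[i])
--     return class_points, class_tags
-- ===== SOURCE B (Python) =====
-- def classesDataToSave(cluster_labels, show_dim, tag):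
--     order = {}
--     for i, label in enumerate(cluster_labels):
--         order.setdefault(str(label), []).append(i)
--     class_points = {lab: [[show_dim[i][0] for i in idxs],
--                           [show_dim[i][1] for i in idxs],
--                           [0] * len(idxs)]
--                     for lab, idxs in order.items()}
--     class_tags = {lab: [tag[i] for i in idxs] for lab, idxs in order.items()}
--     return class_points, class_tags
-- ===== Notes on version B (the rewrite author's own statement) =====
-- stated objective: idiomatic
-- what changed: Instead of interleaving appends into two parallel dicts of ragged lists inside one loop, B first groups the indices by str(label) in one pass and then builds each dict entry with comprehensions over the index groups.
import Mathlib
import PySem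

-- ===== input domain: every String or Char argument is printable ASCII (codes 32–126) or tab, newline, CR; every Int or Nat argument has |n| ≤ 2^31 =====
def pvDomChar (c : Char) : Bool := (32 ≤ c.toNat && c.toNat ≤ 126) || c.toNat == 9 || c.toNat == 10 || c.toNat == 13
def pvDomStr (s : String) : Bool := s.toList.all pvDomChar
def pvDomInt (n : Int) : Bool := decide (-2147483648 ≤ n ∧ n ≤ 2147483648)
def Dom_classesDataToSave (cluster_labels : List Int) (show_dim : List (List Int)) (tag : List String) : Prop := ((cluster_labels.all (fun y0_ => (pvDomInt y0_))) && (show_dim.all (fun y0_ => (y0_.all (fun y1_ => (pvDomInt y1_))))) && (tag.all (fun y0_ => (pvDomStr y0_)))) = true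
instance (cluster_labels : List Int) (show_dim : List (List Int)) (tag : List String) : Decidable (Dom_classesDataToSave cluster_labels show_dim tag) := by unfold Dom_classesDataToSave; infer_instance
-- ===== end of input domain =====

-- B groups the indices by str(label) in one pass and then builds each dict entry by
-- comprehensions over the index groups, instead of A's interleaved appends into two
-- parallel dicts of ragged lists (idiomatic restructuring; same cost).

-- ===== PORT A =====
-- one loop step of A: ensure the label's entries exist, then append to the three
-- point columns and to the tag list (v.getD k [] is exact: every stored value is [p0,p1,p2])
def pvStepA (show_dim : List (List Int)) (tag : List String)
    (st : PySem.Dict String (List (List Int)) × PySem.Dict String (List String))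
    (p : Int × Int) :
    PySem.Dict String (List (List Int)) × PySem.Dict String (List String) :=
  let lab := PySem.Int.toStr p.2
  let st' := if st.1.contains lab then st else (st.1.insert lab [[], [], []], st.2.insert lab [])
  let row := PySem.List.pyGetD show_dim p.1 []
  (st'.1.modify lab [[], [], []] (fun v =>
      [v.getD 0 [] ++ [PySem.List.pyGetD row 0 0],
       v.getD 1 [] ++ [PySem.List.pyGetD row 1 0],
       v.getD 2 [] ++ [(0 : Int)]]),
   st'.2.modify lab [] (fun t => t ++ [PySem.List.pyGetD tag p.1 ""]))

def classesDataToSave (cluster_labels : List Int) (show_dim : List (List Int)) (tag : List String) : (List (String × List (List Int))) × (List (String × List String)) :=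
  let fin := (PySem.List.enumerate cluster_labels 0).foldl (pvStepA show_dim tag)
      (PySem.Dict.empty, PySem.Dict.empty)
  (fin.1.items, fin.2.items)

-- ===== PORT B =====
-- order.setdefault(str(label), []).append(i)  ≡  modify with default []
def pvGroup (labels : List String) : PySem.Dict String (List Int) :=
  (PySem.List.enumerate labels 0).foldl (fun d p => d.modify p.2 [] (fun t => t ++ [p.1]))
    PySem.Dict.empty

def classesDataToSave_alt (cluster_labels : List Int) (show_dim : List (List Int)) (tag : List String) : (List (String × List (List Int))) × (List (String × List String)) :=
  let order := pvGroup (cluster_labels.map PySem.Int.toStr)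
  (order.items.map (fun g =>
      (g.1, [g.2.map (fun i => PySem.List.pyGetD (PySem.List.pyGetD show_dim i []) 0 0),
             g.2.map (fun i => PySem.List.pyGetD (PySem.List.pyGetD show_dim i []) 1 0),
             List.replicate g.2.length (0 : Int)])),
   order.items.map (fun g => (g.1, g.2.map (fun i => PySem.List.pyGetD tag i ""))))

-- ===== PRECONDITION & SPEC =====
-- Pre_ excludes exactly the inputs on which the Python A raises IndexError:
-- show_dim or tag shorter than cluster_labels, or a used row of show_dim with fewer than 2 entries.
def Pre_classesDataToSave (cluster_labels : List Int) (show_dim : List (List Int)) (tag : List String) : Prop :=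
  cluster_labels.length ≤ show_dim.length ∧ cluster_labels.length ≤ tag.length ∧
    ∀ r ∈ show_dim.take cluster_labels.length, 2 ≤ r.length
instance (cluster_labels : List Int) (show_dim : List (List Int)) (tag : List String) : Decidable (Pre_classesDataToSave cluster_labels show_dim tag) := by unfold Pre_classesDataToSave; infer_instance

def pvWitness_classesDataToSave : List Int × List (List Int) × List String :=
  ([0, 1, 0], [[1, 2], [3, 4], [5, 6]], ["a", "b", "c"])

def Spec_classesDataToSave (cluster_labels : List Int) (show_dim : List (List Int)) (tag : List String) (out : (List (String × List (List Int))) × (List (String × List String))) : Prop := out = classesDataToSave_alt cluster_labels show_dim tag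
instance (cluster_labels : List Int) (show_dim : List (List Int)) (tag : List String) (out : (List (String × List (List Int))) × (List (String × List String))) : Decidable (Spec_classesDataToSave cluster_labels show_dim tag out) := by unfold Spec_classesDataToSave; infer_instance

-- ===== CLAIM (what is proved, stated in full; the proofs are below) =====
def Claim_equal_classesDataToSave : Prop := ∀ (cluster_labels : List Int) (show_dim : List (List Int)) (tag : List String), Dom_classesDataToSave cluster_labels show_dim tag → Pre_classesDataToSave cluster_labels show_dim tag → Spec_classesDataToSave cluster_labels show_dim tag (classesDataToSave cluster_labels show_dim tag)

-- ===== LEMMAS AND PROOFS =====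

-- inserting a key makes the key list a set-add of the old key list
theorem pv_keys_insert_add {ν : Type} (d : PySem.Dict String ν) (k : String) (v : ν) :
    (d.insert k v).keys = PySem.Set.add d.keys k := by
  by_cases hc : d.contains k = true
  · have hm : k ∈ d.keys := (PySem.Dict.contains_iff_mem_keys d k).mp hc
    rw [PySem.Dict.keys_insert_of_contains d v hc]
    simp [PySem.Set.add, hm]
  · have hc' : d.contains k = false := by simpa using hc
    have hm : k ∉ d.keys := by
      intro hm; exact hc ((PySem.Dict.contains_iff_mem_keys d k).mpr hm)
    rw [PySem.Dict.keys_insert_of_not_contains d v hc']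
    simp [PySem.Set.add, hm]

-- enumerate commutes with map on the elements
theorem pv_enumerate_map {α β : Type} (f : α → β) (xs : List α) (s : Int) :
    PySem.List.enumerate (xs.map f) s
      = (PySem.List.enumerate xs s).map (fun p => (p.1, f p.2)) := by
  induction xs generalizing s with
  | nil => simp [PySem.List.enumerate_nil]
  | cons x xs ih => simp [PySem.List.enumerate_cons, ih]

-- the value A appends for pair p into column j
def pvX0 (show_dim : List (List Int)) (i : Int) : Int :=
  PySem.List.pyGetD (PySem.List.pyGetD show_dim i []) 0 0
def pvX1 (show_dim : List (List Int)) (i : Int) : Int :=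
  PySem.List.pyGetD (PySem.List.pyGetD show_dim i []) 1 0

-- A's modify function on the points value
def pvF3 (show_dim : List (List Int)) (p : Int × Int) (v : List (List Int)) : List (List Int) :=
  [v.getD 0 [] ++ [pvX0 show_dim p.1], v.getD 1 [] ++ [pvX1 show_dim p.1], v.getD 2 [] ++ [(0 : Int)]]

theorem pv_F3_fold (show_dim : List (List Int)) (ps : List (Int × Int)) :
    ∀ a b g : List Int,
      ps.foldl (fun v p => pvF3 show_dim p v) [a, b, g]
        = [a ++ ps.map (fun p => pvX0 show_dim p.1),
           b ++ ps.map (fun p => pvX1 show_dim p.1),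
           g ++ List.replicate ps.length (0 : Int)] := by
  induction ps with
  | nil => intro a b g; simp
  | cons p ps ih =>
    intro a b g
    simp only [List.foldl_cons, List.map_cons, List.length_cons]
    rw [show pvF3 show_dim p [a, b, g]
        = [a ++ [pvX0 show_dim p.1], b ++ [pvX1 show_dim p.1], g ++ [(0 : Int)]] from rfl, ih]
    simp [List.replicate_succ, List.append_assoc]

-- per-step facts about A's loop body
theorem pv_stepA_fst_keys (sd : List (List Int)) (tg : List String)
    (st : PySem.Dict String (List (List Int)) × PySem.Dict String (List String)) (p : Int × Int) :
    (pvStepA sd tg st p).1.keys = PySem.Set.add st.1.keys (PySem.Int.toStr p.2) := by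
  by_cases hc : st.1.contains (PySem.Int.toStr p.2) = true
  · have hm := (PySem.Dict.contains_iff_mem_keys st.1 (PySem.Int.toStr p.2)).mp hc
    simp only [pvStepA, hc, if_true]
    rw [PySem.Dict.keys_modify, pv_keys_insert_add]
  · have hc' : st.1.contains (PySem.Int.toStr p.2) = false := by simpa using hc
    have hm : PySem.Int.toStr p.2 ∉ st.1.keys := by
      intro hm; exact hc ((PySem.Dict.contains_iff_mem_keys st.1 _).mpr hm)
    simp only [pvStepA, hc', Bool.false_eq_true, if_false]
    rw [PySem.Dict.keys_modify, pv_keys_insert_add, pv_keys_insert_add]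
    simp [PySem.Set.add, hm]

theorem pv_stepA_snd_keys (sd : List (List Int)) (tg : List String)
    (st : PySem.Dict String (List (List Int)) × PySem.Dict String (List String)) (p : Int × Int)
    (h : st.2.keys = st.1.keys) :
    (pvStepA sd tg st p).2.keys = PySem.Set.add st.2.keys (PySem.Int.toStr p.2) := by
  by_cases hc : st.1.contains (PySem.Int.toStr p.2) = true
  · simp only [pvStepA, hc, if_true]
    rw [PySem.Dict.keys_modify, pv_keys_insert_add]
  · have hc' : st.1.contains (PySem.Int.toStr p.2) = false := by simpa using hc
    have hm : PySem.Int.toStr p.2 ∉ st.2.keys := by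
      rw [h]; intro hm; exact hc ((PySem.Dict.contains_iff_mem_keys st.1 _).mpr hm)
    simp only [pvStepA, hc', Bool.false_eq_true, if_false]
    rw [PySem.Dict.keys_modify, pv_keys_insert_add, pv_keys_insert_add]
    simp [PySem.Set.add, hm]

theorem pv_stepA_fst_getD (sd : List (List Int)) (tg : List String)
    (st : PySem.Dict String (List (List Int)) × PySem.Dict String (List String)) (p : Int × Int)
    (c : String) :
    (pvStepA sd tg st p).1.getD c [[], [], []]
      = if c = PySem.Int.toStr p.2 then pvF3 sd p (st.1.getD c [[], [], []])
        else st.1.getD c [[], [], []] := by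
  by_cases hc : st.1.contains (PySem.Int.toStr p.2) = true
  · simp only [pvStepA, hc, if_true]
    rw [PySem.Dict.getD_modify]
    by_cases h : c = PySem.Int.toStr p.2 <;> simp [h, pvF3, pvX0, pvX1]
  · have hc' : st.1.contains (PySem.Int.toStr p.2) = false := by simpa using hc
    have hd : st.1.getD (PySem.Int.toStr p.2) [[], [], []] = [[], [], []] :=
      PySem.Dict.getD_of_not_contains st.1 _ hc'
    simp only [pvStepA, hc', Bool.false_eq_true, if_false]
    rw [PySem.Dict.getD_modify]
    by_cases h : c = PySem.Int.toStr p.2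
    · simp [h, hd, pvF3, pvX0, pvX1]
    · simp [h, PySem.Dict.getD_insert]

theorem pv_stepA_snd_getD (sd : List (List Int)) (tg : List String)
    (st : PySem.Dict String (List (List Int)) × PySem.Dict String (List String)) (p : Int × Int)
    (h : st.2.keys = st.1.keys) (c : String) :
    (pvStepA sd tg st p).2.getD c []
      = if c = PySem.Int.toStr p.2 then st.2.getD c [] ++ [PySem.List.pyGetD tg p.1 ""]
        else st.2.getD c [] := by
  by_cases hc : st.1.contains (PySem.Int.toStr p.2) = true
  · simp only [pvStepA, hc, if_true]
    rw [PySem.Dict.getD_modify]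
    by_cases hcc : c = PySem.Int.toStr p.2 <;> simp [hcc]
  · have hc' : st.1.contains (PySem.Int.toStr p.2) = false := by simpa using hc
    have hc2 : st.2.contains (PySem.Int.toStr p.2) = false := by
      by_contra hh
      have : st.2.contains (PySem.Int.toStr p.2) = true := by simpa using hh
      have hm := (PySem.Dict.contains_iff_mem_keys st.2 _).mp this
      rw [h] at hm
      exact absurd ((PySem.Dict.contains_iff_mem_keys st.1 _).mpr hm) (by simp [hc'])
    have hd : st.2.getD (PySem.Int.toStr p.2) [] = [] :=
      PySem.Dict.getD_of_not_contains st.2 _ hc2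
    simp only [pvStepA, hc', Bool.false_eq_true, if_false]
    rw [PySem.Dict.getD_modify]
    by_cases hcc : c = PySem.Int.toStr p.2
    · simp [hcc, hd]
    · simp [hcc, PySem.Dict.getD_insert]

-- master invariant for A's fold
theorem pv_A_master (show_dim : List (List Int)) (tag : List String) (l : List (Int × Int)) :
    ∀ (pts : PySem.Dict String (List (List Int))) (tgs : PySem.Dict String (List String)),
      tgs.keys = pts.keys →
      (l.foldl (pvStepA show_dim tag) (pts, tgs)).1.keys
          = PySem.Set.update pts.keys (l.map (fun p => PySem.Int.toStr p.2)) ∧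
      (l.foldl (pvStepA show_dim tag) (pts, tgs)).2.keys
          = (l.foldl (pvStepA show_dim tag) (pts, tgs)).1.keys ∧
      (∀ c, (l.foldl (pvStepA show_dim tag) (pts, tgs)).1.getD c [[], [], []]
          = (l.filter (fun p => PySem.Int.toStr p.2 == c)).foldl
              (fun v p => pvF3 show_dim p v) (pts.getD c [[], [], []])) ∧
      (∀ c, (l.foldl (pvStepA show_dim tag) (pts, tgs)).2.getD c []
          = tgs.getD c []
            ++ ((l.filter (fun p => PySem.Int.toStr p.2 == c)).map
                  (fun p => PySem.List.pyGetD tag p.1 ""))) := by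
  induction l with
  | nil =>
    intro pts tgs h
    exact ⟨by simp [PySem.Set.update], by simpa using h, fun c => by simp, fun c => by simp⟩
  | cons p l ih =>
    intro pts tgs h
    have hkeys2 : (pvStepA show_dim tag (pts, tgs) p).2.keys
        = (pvStepA show_dim tag (pts, tgs) p).1.keys := by
      rw [pv_stepA_snd_keys show_dim tag _ p h, pv_stepA_fst_keys show_dim tag _ p, h]
    obtain ⟨ihk, ihkeq, ihg, ihgt⟩ := ih (pvStepA show_dim tag (pts, tgs) p).1
        (pvStepA show_dim tag (pts, tgs) p).2 hkeys2
    have hfold : ∀ q : PySem.Dict String (List (List Int)) × PySem.Dict String (List String),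
        ((pvStepA show_dim tag q p).1, (pvStepA show_dim tag q p).2) = pvStepA show_dim tag q p :=
      fun q => rfl
    rw [hfold] at ihk ihkeq ihg ihgt
    refine ⟨?_, ?_, ?_, ?_⟩
    · rw [List.foldl_cons, ihk, pv_stepA_fst_keys show_dim tag _ p]
      simp [PySem.Set.update]
    · rw [List.foldl_cons]; exact ihkeq
    · intro c
      rw [List.foldl_cons, ihg c, pv_stepA_fst_getD show_dim tag _ p c]
      by_cases hcc : c = PySem.Int.toStr p.2
      · subst hcc; simp
      · simp [hcc, Ne.symm hcc]
    · intro c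
      rw [List.foldl_cons, ihgt c, pv_stepA_snd_getD show_dim tag _ p h c]
      by_cases hcc : c = PySem.Int.toStr p.2
      · subst hcc; simp
      · simp [hcc, Ne.symm hcc]

-- master invariant for B's grouping fold
theorem pv_B_master (l : List (Int × String)) :
    ∀ d : PySem.Dict String (List Int),
      (l.foldl (fun d p => d.modify p.2 [] (fun t => t ++ [p.1])) d).keys
          = PySem.Set.update d.keys (l.map (·.2)) ∧
      (∀ c, (l.foldl (fun d p => d.modify p.2 [] (fun t => t ++ [p.1])) d).getD c []
          = d.getD c [] ++ (l.filter (fun p => p.2 == c)).map (·.1)) := by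
  induction l with
  | nil => intro d; simp [PySem.Set.update]
  | cons p l ih =>
    intro d
    obtain ⟨ihk, ihg⟩ := ih (d.modify p.2 [] (fun t => t ++ [p.1]))
    refine ⟨?_, ?_⟩
    · rw [List.foldl_cons, ihk, PySem.Dict.keys_modify, pv_keys_insert_add]
      simp [PySem.Set.update]
    · intro c
      rw [List.foldl_cons, ihg c, PySem.Dict.getD_modify]
      by_cases h : c = p.2
      · subst h; simp
      · simp [h, Ne.symm h]

-- ===== VERDICT (by name: the statement is the Claim_ definition above) =====
theorem classesDataToSave_spec : Claim_equal_classesDataToSave := by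
  intro cls sd tg _ _
  show classesDataToSave cls sd tg = classesDataToSave_alt cls sd tg
  obtain ⟨hk, hkeq, hg, hgt⟩ := pv_A_master sd tg (PySem.List.enumerate cls 0)
      PySem.Dict.empty PySem.Dict.empty (by simp)
  obtain ⟨hbk, hbg⟩ := pv_B_master (PySem.List.enumerate (cls.map PySem.Int.toStr) 0)
      PySem.Dict.empty
  have hl' : PySem.List.enumerate (cls.map PySem.Int.toStr) 0
      = (PySem.List.enumerate cls 0).map (fun p => (p.1, PySem.Int.toStr p.2)) :=
    pv_enumerate_map _ _ _
  -- the common key list, in first-occurrence order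
  have hkA : ((PySem.List.enumerate cls 0).foldl (pvStepA sd tg)
        (PySem.Dict.empty, PySem.Dict.empty)).1.keys
      = PySem.Set.ofList ((PySem.List.enumerate cls 0).map (fun p => PySem.Int.toStr p.2)) := by
    rw [hk]; rfl
  have hkB : (pvGroup (cls.map PySem.Int.toStr)).keys
      = PySem.Set.ofList ((PySem.List.enumerate cls 0).map (fun p => PySem.Int.toStr p.2)) := by
    rw [pvGroup, hbk, hl']
    simp [List.map_map]
    rfl
  have hndA : ((PySem.List.enumerate cls 0).foldl (pvStepA sd tg)
      (PySem.Dict.empty, PySem.Dict.empty)).1.keys.Nodup := by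
    rw [hkA]; exact PySem.Set.nodup_ofList _
  have hndA2 : ((PySem.List.enumerate cls 0).foldl (pvStepA sd tg)
      (PySem.Dict.empty, PySem.Dict.empty)).2.keys.Nodup := by rw [hkeq]; exact hndA
  have hndB : (pvGroup (cls.map PySem.Int.toStr)).keys.Nodup := by
    rw [hkB]; exact PySem.Set.nodup_ofList _
  have hBgd : ∀ c, (pvGroup (cls.map PySem.Int.toStr)).getD c []
      = ((PySem.List.enumerate cls 0).filter (fun p => PySem.Int.toStr p.2 == c)).map (·.1) := by
    intro c
    rw [pvGroup, hbg c, hl', PySem.Dict.getD_empty, List.nil_append, List.filter_map,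
      List.map_map]
    rfl
  rw [classesDataToSave, classesDataToSave_alt,
    PySem.Dict.items_eq_map_keys _ hndA ([[], [], []] : List (List Int)),
    PySem.Dict.items_eq_map_keys _ hndA2 ([] : List String),
    PySem.Dict.items_eq_map_keys _ hndB ([] : List Int), hkA, hkB, hkeq, hkA]
  refine Prod.ext ?_ ?_
  · simp only [List.map_map]
    refine List.map_congr_left (fun c hc => ?_)
    simp only [Function.comp_apply]
    rw [hg c, hBgd c, PySem.Dict.getD_empty, pv_F3_fold]
    simp [List.map_map, pvX0, pvX1]
  · simp only [List.map_map]
    refine List.map_congr_left (fun c hc => ?_)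
    simp only [Function.comp_apply]
    rw [hgt c, hBgd c, PySem.Dict.getD_empty, List.nil_append]
    simp [List.map_map]
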